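-- pv_equiv track=rewrite | github.com/pypi-data/pypi-mirror-354 | packages/modal-for-noobs/modal_for_noobs-0.2.0.tar.gz/modal_for_noobs-0.2.0/src/modal_for_noobs/modal_deploy.py | _extract_app_id_from_output
-- ===== SOURCE A (Python) =====
-- from typing import Any, Dict, List, Optional
--
-- def _extract_app_id_from_output(output: str) -> Optional[str]:
--     """Extract app ID from Modal output."""
--     lines = output.split('\n')
--     for line in lines:
--         if 'App ID:' in line or 'app-id:' in line:
--             parts = line.split()
--             for i, part in enumerate(parts):
--                 if 'id' in part.lower() and i + 1 < len(parts):
--                     return parts[i + 1]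
--     return None
-- ===== SOURCE B (Python) =====
-- def _extract_app_id_from_output(output):
--     """Extract app ID from Modal output.
--
--     Single-pass character-level scanner per matching line: streams characters,
--     assembles whitespace-separated tokens on the fly, and returns the token that
--     follows the first token containing 'id' -- no line.split(), no indices.
--     """
--     for line in output.split('\n'):
--         if 'App ID:' in line or 'app-id:' in line:
--             token = []
--             want = False
--             for ch in line:
--                 if ch.isspace():
--                     if token:
--                         if want:
--                             return ''.join(token)
--                         want = 'id' in ''.join(token).lower()
--                         token = []
--                 else:
--                     token.append(ch)
--             if want and token:
--                 return ''.join(token)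
--     return None
-- ===== Notes on version B (the rewrite author's own statement) =====
-- stated objective: alternative
-- what changed: Replaced A's inner pass (line.split() into a list, enumerate with index, bounds check i+1<len, indexed access parts[i+1]) by a single-pass character-level tokenizer state machine that streams each matching line's characters, assembling tokens on the fly and returning the token that follows the first 'id'-containing token, with no split list and no indices.
import Mathlib
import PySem

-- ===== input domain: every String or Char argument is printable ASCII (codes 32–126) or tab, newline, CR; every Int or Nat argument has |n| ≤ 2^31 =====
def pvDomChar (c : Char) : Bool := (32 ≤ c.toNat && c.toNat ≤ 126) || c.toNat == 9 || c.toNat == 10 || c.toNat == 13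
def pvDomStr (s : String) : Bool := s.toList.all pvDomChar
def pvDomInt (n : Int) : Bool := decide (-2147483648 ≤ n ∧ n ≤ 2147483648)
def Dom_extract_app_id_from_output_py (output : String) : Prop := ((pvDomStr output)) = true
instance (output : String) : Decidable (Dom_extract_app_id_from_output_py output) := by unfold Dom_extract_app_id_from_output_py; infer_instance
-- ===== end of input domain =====

-- B replaces A's split/enumerate/index inner pass by a single-pass character-level
-- tokenizer state machine per matching line (no line.split(), no indices); same values, no speed claim.

-- ===== PORT A =====
-- line guard shared verbatim by both Pythons: 'App ID:' in line or 'app-id:' in line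
def pvLineHit (line : String) : Bool :=
  PySem.Str.isIn "App ID:" line || PySem.Str.isIn "app-id:" line
-- A's token guard: 'id' in part.lower()
def pvIdTok (s : String) : Bool := PySem.Str.isIn "id" (PySem.Str.lower s)

def extract_app_id_from_output_py (output : String) : Option String :=
  let lines := (PySem.Str.split? output "\n").getD []   -- sep "\n" ≠ "", split? is always some
  lines.findSome? (fun line =>
    if pvLineHit line then
      let parts := PySem.Str.split₀ line
      (PySem.List.enumerate parts).findSome? (fun ip =>
        if pvIdTok ip.2 && decide (ip.1 + 1 < (parts.length : Int)) then
          PySem.List.pyGet? parts (ip.1 + 1)    -- the guard makes the index in range, Python never raises here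
        else none)
    else none)

-- ===== PORT B =====
-- B's token guard on the character level: 'id' in ''.join(token).lower()
def pvIdTokC (t : List Char) : Bool := PySem.Chars.isIn "id".toList (PySem.Chars.lower t)

-- the per-line for-ch loop of Source B: state = (reversed current token, want flag)
def pvScanGo : List Char → List Char → Bool → Option String
  | [], tok, want =>
      if want && !tok.isEmpty then some (String.ofList tok.reverse) else none
  | c :: rest, tok, want =>
      if PySem.Chars.isspace c then
        if !tok.isEmpty then
          if want then some (String.ofList tok.reverse)
          else pvScanGo rest [] (pvIdTokC tok.reverse)
        else pvScanGo rest [] want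
      else pvScanGo rest (c :: tok) want

def extract_app_id_from_output_py_alt (output : String) : Option String :=
  ((PySem.Str.split? output "\n").getD []).findSome? (fun line =>
    if pvLineHit line then pvScanGo line.toList [] false else none)

-- ===== PRECONDITION & SPEC =====
def Spec_extract_app_id_from_output_py (output : String) (out : Option String) : Prop := out = extract_app_id_from_output_py_alt output
instance (output : String) (out : Option String) : Decidable (Spec_extract_app_id_from_output_py output out) := by unfold Spec_extract_app_id_from_output_py; infer_instance

-- ===== CLAIM (what is proved, stated in full; the proofs are below) =====
def Claim_equal_extract_app_id_from_output_py : Prop := ∀ (output : String), Dom_extract_app_id_from_output_py output → Spec_extract_app_id_from_output_py output (extract_app_id_from_output_py output)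

-- ===== LEMMAS AND PROOFS =====

-- A's inner result in closed form: first adjacent token pair whose first member passes `cond`
def pvPairsHead (cond : String → Bool) (ts : List String) : Option String :=
  ((ts.zip ts.tail).filterMap (fun pn => if cond pn.1 then some pn.2 else none)).head?

-- A's enumerate-with-index scan over a suffix `xs` of `full` equals the pair form
theorem pv_inner (cond : String → Bool) (xs full : List String) (k : Nat) (hk : full.drop k = xs) :
    (PySem.List.enumerate xs (k : Int)).findSome? (fun ip =>
        if cond ip.2 && decide (ip.1 + 1 < (full.length : Int)) then
          PySem.List.pyGet? full (ip.1 + 1)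
        else none)
    = pvPairsHead cond xs := by
  induction xs generalizing k with
  | nil => simp [PySem.List.enumerate, pvPairsHead]
  | cons x xs ih =>
    have h2 : k < full.length := by
      by_contra h
      rw [List.drop_eq_nil_of_le (by omega)] at hk
      simp at hk
    have hlen : full.length = k + 1 + xs.length := by
      have h1 := congrArg List.length hk
      simp at h1
      omega
    have hdrop : full.drop (k + 1) = xs := by
      rw [← List.tail_drop, hk]
      rfl
    rw [PySem.List.enumerate_cons, List.findSome?_cons]
    by_cases hc : cond x = true
    · cases xs with
      | nil =>
        have hg : decide ((k : Int) + 1 < (full.length : Int)) = false := by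
          simp only [decide_eq_false_iff_not]
          simp only [List.length_nil, Nat.add_zero] at hlen
          rw [hlen]; push_cast; omega
        simp [hc, hg, PySem.List.enumerate, pvPairsHead]
      | cons y ys =>
        have hg : decide ((k : Int) + 1 < (full.length : Int)) = true := by
          simp only [decide_eq_true_eq]
          simp only [List.length_cons] at hlen
          rw [hlen]; push_cast; omega
        have hget : PySem.List.pyGet? full ((k : Int) + 1) = some y := by
          have hcast : ((k : Int) + 1) = ((k + 1 : Nat) : Int) := by push_cast; ring
          rw [hcast, PySem.List.pyGet?_natCast]
          have h0 : full[k+1]? = (full.drop (k+1))[0]? := by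
            rw [List.getElem?_drop]
          rw [h0, hdrop]; rfl
        simp [hc, hg, hget, pvPairsHead]
    · rw [Bool.not_eq_true] at hc
      have hcast : ((k : Int) + 1) = ((k + 1 : Nat) : Int) := by push_cast; ring
      simp only [hc, Bool.false_and, Bool.false_eq_true, if_false]
      rw [hcast, ih (k + 1) hdrop]
      cases xs with
      | nil => rfl
      | cons y ys => simp [pvPairsHead, hc]

-- split₀.go with a non-empty accumulator just prepends the finished tokens
theorem pv_go_acc (cs cur : List Char) (acc : List (List Char)) :
    PySem.Chars.split₀.go cs cur acc = acc.reverse ++ PySem.Chars.split₀.go cs cur [] := by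
  induction cs generalizing cur acc with
  | nil =>
    by_cases h : cur.isEmpty <;> simp [PySem.Chars.split₀.go, h]
  | cons c rest ih =>
    by_cases hs : PySem.Chars.isspace c <;> by_cases h : cur.isEmpty = true
    · simp only [PySem.Chars.split₀.go, hs, h, if_true]
      exact ih [] acc
    · simp only [PySem.Chars.split₀.go, hs, h, if_true, Bool.false_eq_true, if_false]
      rw [ih [] (cur.reverse :: acc), ih [] [cur.reverse]]
      simp
    · simp only [PySem.Chars.split₀.go, hs, Bool.false_eq_true, if_false]
      exact ih (c :: cur) acc
    · simp only [PySem.Chars.split₀.go, hs, Bool.false_eq_true, if_false]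
      exact ih (c :: cur) acc

-- the pair form over mapped strings, on the char side
def pvPairsHeadC (ts : List (List Char)) : Option String :=
  pvPairsHead pvIdTok (ts.map String.ofList)

-- B's token guard agrees with A's on the string built from the token
theorem pv_idtok (t : List Char) : pvIdTok (String.ofList t) = pvIdTokC t := by
  simp [pvIdTok, pvIdTokC, PySem.Str.isIn, PySem.Str.lower]

-- the scanner invariant: with `want` set, return the next finished token; otherwise the pair form on the remaining tokens
theorem pv_scan (cs : List Char) : ∀ (cur : List Char) (want : Bool),
    pvScanGo cs cur want =
      if want then ((PySem.Chars.split₀.go cs cur []).map String.ofList).head?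
      else pvPairsHeadC (PySem.Chars.split₀.go cs cur []) := by
  induction cs with
  | nil =>
    intro cur want
    by_cases h : cur.isEmpty <;> cases want <;>
      simp_all [pvScanGo, PySem.Chars.split₀.go, pvPairsHeadC, pvPairsHead]
  | cons c rest ih =>
    intro cur want
    by_cases hs : PySem.Chars.isspace c
    · by_cases h : cur.isEmpty = true
      · simp only [pvScanGo, hs, h, if_true, Bool.not_true, Bool.false_eq_true, if_false,
          PySem.Chars.split₀.go]
        exact ih [] want
      · simp only [pvScanGo, hs, h, Bool.not_false, if_true, PySem.Chars.split₀.go,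
          Bool.false_eq_true, if_false]
        rw [pv_go_acc rest [] [cur.reverse]]
        cases want with
        | true => simp
        | false =>
          simp only [Bool.false_eq_true, if_false]
          rw [ih [] (pvIdTokC cur.reverse)]
          by_cases hid : pvIdTokC cur.reverse = true
          · simp only [hid, if_true]
            cases hrest : PySem.Chars.split₀.go rest [] [] with
            | nil => simp [pvPairsHeadC, pvPairsHead]
            | cons t ts =>
              simp [pvPairsHeadC, pvPairsHead, pv_idtok, hid]
          · rw [Bool.not_eq_true] at hid
            simp only [hid, Bool.false_eq_true, if_false]
            cases hrest : PySem.Chars.split₀.go rest [] [] with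
            | nil => simp [pvPairsHeadC, pvPairsHead]
            | cons t ts =>
              simp [pvPairsHeadC, pvPairsHead, pv_idtok, hid]
    · simp only [pvScanGo, hs, Bool.false_eq_true, if_false, PySem.Chars.split₀.go]
      exact ih (c :: cur) want

-- findSome? respects pointwise equality of the body
theorem pv_findSome_congr {α β : Type} (xs : List α) (f g : α → Option β)
    (h : ∀ x, f x = g x) : xs.findSome? f = xs.findSome? g := by
  induction xs with
  | nil => rfl
  | cons x xs ih => rw [List.findSome?_cons, List.findSome?_cons, h x, ih]

-- per line: A's inner loop equals B's scanner
theorem pv_line (line : String) :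
    (PySem.List.enumerate (PySem.Str.split₀ line)).findSome? (fun ip =>
        if pvIdTok ip.2 && decide (ip.1 + 1 < ((PySem.Str.split₀ line).length : Int)) then
          PySem.List.pyGet? (PySem.Str.split₀ line) (ip.1 + 1)
        else none)
    = pvScanGo line.toList [] false := by
  have h0 := pv_inner pvIdTok (PySem.Str.split₀ line) (PySem.Str.split₀ line) 0 (by simp)
  simp only [Nat.cast_zero] at h0
  rw [h0, pv_scan line.toList [] false]
  simp only [Bool.false_eq_true, if_false, pvPairsHeadC]
  congr 1   -- Str.split₀ IS (Chars.split₀ ∘ toList) mapped back through String.ofList, definitionally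

-- ===== VERDICT (by name: the statement is the Claim_ definition above) =====
theorem extract_app_id_from_output_py_spec : Claim_equal_extract_app_id_from_output_py := by
  intro output _
  unfold Spec_extract_app_id_from_output_py extract_app_id_from_output_py extract_app_id_from_output_py_alt
  apply pv_findSome_congr
  intro line
  by_cases hl : pvLineHit line = true
  · simp only [hl, if_true]
    exact pv_line line
  · simp [hl]
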